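-- pv_equiv track=rewrite | github.com/xiyang-aads-lilly/ROLL | roll/third_party/sglang/v046post4_patch/async_engine.py | trim_overlap_tokens
-- ===== SOURCE A (Python) =====
-- def list_endswith(lst, suffix):
--     # 检查 lst 是否以 suffix 结尾
--     return lst[-len(suffix):] == suffix if len(suffix) <= len(lst) else False
--
-- def trim_overlap_tokens(existing_tokens, new_chunk_tokens):
--     """
--     copy trim_overlap in int list
--     """
--     max_overlap = 0
--     max_possible = min(len(existing_tokens), len(new_chunk_tokens))
--     for i in range(max_possible, 0, -1):
--         if list_endswith(existing_tokens, new_chunk_tokens[:i]):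
--             max_overlap = i
--             break
--     return new_chunk_tokens[max_overlap:]
-- ===== SOURCE B (Python) =====
-- def trim_overlap_tokens(existing_tokens, new_chunk_tokens):
--     """
--     copy trim_overlap in int list
--     """
--     n = len(new_chunk_tokens)
--     # single left-to-right pass over existing_tokens maintaining the set of all
--     # overlap lengths k such that new_chunk_tokens[:k] is a suffix of the part seen so far
--     cands = {0}
--     for x in existing_tokens:
--         cands = {k + 1 for k in cands if k < n and new_chunk_tokens[k] == x} | {0}
--     return new_chunk_tokens[max(cands):]
-- ===== Notes on version B (the rewrite author's own statement) =====
-- stated objective: faster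
-- what changed: Replaced A's descending scan over candidate overlap lengths (each candidate i tested by building the slice new_chunk_tokens[:i] and comparing it against the tail of existing_tokens) with a single left-to-right pass over existing_tokens maintaining the set of live overlap lengths (an NFA-style match-set), taking its maximum at the end.
import Mathlib
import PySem

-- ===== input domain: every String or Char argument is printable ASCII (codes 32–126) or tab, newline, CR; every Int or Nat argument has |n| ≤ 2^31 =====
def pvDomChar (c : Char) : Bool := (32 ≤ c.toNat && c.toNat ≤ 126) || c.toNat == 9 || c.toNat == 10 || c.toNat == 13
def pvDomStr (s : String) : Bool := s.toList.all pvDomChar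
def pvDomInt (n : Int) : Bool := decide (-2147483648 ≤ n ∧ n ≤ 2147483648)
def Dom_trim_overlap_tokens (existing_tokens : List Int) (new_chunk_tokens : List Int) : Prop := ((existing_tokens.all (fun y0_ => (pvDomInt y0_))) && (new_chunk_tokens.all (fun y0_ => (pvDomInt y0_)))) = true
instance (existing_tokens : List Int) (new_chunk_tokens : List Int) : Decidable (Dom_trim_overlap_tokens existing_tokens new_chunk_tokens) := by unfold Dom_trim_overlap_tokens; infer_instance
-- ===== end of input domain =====

-- B replaces A's descending scan over overlap lengths (each candidate tested by building
-- and comparing a slice) with one left-to-right pass over existing_tokens maintaining the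
-- set of live overlap lengths; same return value, measurably faster (objective: faster).

-- ===== PORT A =====
def list_endswith (lst : List Int) (suffix : List Int) : Bool :=
  if (suffix.length : Int) ≤ (lst.length : Int) then
    PySem.List.slice lst (some (-(suffix.length : Int))) none == suffix
  else false

-- A's 'for i in range(max_possible, 0, -1)' loop with its break, over the range list
def pvLoopA (existing_tokens new_chunk_tokens : List Int) : List Int → Int
  | [] => 0
  | i :: rest =>
    if list_endswith existing_tokens (PySem.List.slice new_chunk_tokens none (some i)) then i
    else pvLoopA existing_tokens new_chunk_tokens rest

def trim_overlap_tokens (existing_tokens : List Int) (new_chunk_tokens : List Int) : List Int :=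
  let max_possible : Int := min (existing_tokens.length : Int) (new_chunk_tokens.length : Int)
  let max_overlap : Int := pvLoopA existing_tokens new_chunk_tokens (PySem.List.pyRange max_possible 0 (-1))
  PySem.List.slice new_chunk_tokens (some max_overlap) none

-- ===== PORT B =====
-- {k + 1 for k in cands if k < n and new_chunk_tokens[k] == x} | {0}
def pvStepB (new_chunk_tokens : List Int) (cands : PySem.Set Int) (x : Int) : PySem.Set Int :=
  PySem.Set.union
    (PySem.Set.ofList ((cands.filter (fun k =>
        decide (k < (new_chunk_tokens.length : Int)) &&
        (PySem.List.pyGet? new_chunk_tokens k == some x))).map (· + 1)))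
    ([0] : List Int)

def trim_overlap_tokens_alt (existing_tokens : List Int) (new_chunk_tokens : List Int) : List Int :=
  let cands : PySem.Set Int := existing_tokens.foldl (pvStepB new_chunk_tokens) (PySem.Set.ofList [(0 : Int)])
  -- max(cands): cands always contains 0, so Python's max never raises; getD 0 is unreachable
  PySem.List.slice new_chunk_tokens (some ((PySem.List.max? cands (fun y => y)).getD 0)) none

-- ===== PRECONDITION & SPEC =====
def Spec_trim_overlap_tokens (existing_tokens : List Int) (new_chunk_tokens : List Int) (out : List Int) : Prop := out = trim_overlap_tokens_alt existing_tokens new_chunk_tokens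
instance (existing_tokens : List Int) (new_chunk_tokens : List Int) (out : List Int) : Decidable (Spec_trim_overlap_tokens existing_tokens new_chunk_tokens out) := by unfold Spec_trim_overlap_tokens; infer_instance

-- ===== CLAIM (what is proved, stated in full; the proofs are below) =====
def Claim_equal_trim_overlap_tokens : Prop := ∀ (existing_tokens : List Int) (new_chunk_tokens : List Int), Dom_trim_overlap_tokens existing_tokens new_chunk_tokens → Spec_trim_overlap_tokens existing_tokens new_chunk_tokens (trim_overlap_tokens existing_tokens new_chunk_tokens)

-- ===== LEMMAS AND PROOFS =====

-- k is a valid overlap length of nw against (a prefix) p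
def pvOk (p nw : List Int) (k : Nat) : Prop := k ≤ nw.length ∧ nw.take k <:+ p

-- the match-set invariant of B's pass
def pvInv (p nw : List Int) (S : List Int) : Prop :=
  ∀ j : Int, j ∈ S ↔ ∃ k : Nat, j = (k : Int) ∧ pvOk p nw k

lemma pv_suffix_concat {l p : List Int} {x : Int} :
    l <:+ p ++ [x] ↔ l = [] ∨ ∃ l', l = l' ++ [x] ∧ l' <:+ p := by
  constructor
  · rintro ⟨t, ht⟩
    rcases l.eq_nil_or_concat with rfl | ⟨l', y, rfl⟩
    · exact Or.inl rfl
    · rw [List.concat_eq_append, ← List.append_assoc] at ht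
      obtain ⟨h1, h2⟩ := List.append_inj' ht rfl
      obtain rfl : y = x := by simpa using h2
      exact Or.inr ⟨l', List.concat_eq_append, t, h1⟩
  · rintro (rfl | ⟨l', rfl, t, ht⟩)
    · exact List.nil_suffix
    · exact ⟨t, by rw [← List.append_assoc, ht]⟩

lemma pvInv_nil (nw : List Int) : pvInv [] nw [(0 : Int)] := by
  intro j
  simp only [List.mem_singleton]
  constructor
  · rintro rfl
    exact ⟨0, rfl, Nat.zero_le _, List.nil_suffix⟩
  · rintro ⟨k, rfl, hk, hs⟩
    have := List.suffix_nil.mp hs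
    have hk0 : k = 0 := by
      rcases List.take_eq_nil_iff.mp this with h | h
      · exact h
      · simp [h] at hk; omega
    simp [hk0]

lemma pvInv_step (p nw : List Int) (S : List Int) (x : Int) (h : pvInv p nw S) :
    pvInv (p ++ [x]) nw (pvStepB nw S x) := by
  intro j
  unfold pvStepB
  rw [PySem.Set.mem_union, PySem.Set.mem_ofList]
  simp only [List.mem_map, List.mem_filter, List.mem_singleton, Bool.and_eq_true,
    decide_eq_true_eq, beq_iff_eq]
  constructor
  · rintro (⟨k0, ⟨hk0S, hlt, hget⟩, rfl⟩ | rfl)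
    · obtain ⟨k, rfl, hk, hs⟩ := (h k0).mp hk0S
      have hklt : k < nw.length := by exact_mod_cast hlt
      refine ⟨k + 1, by push_cast; ring, by omega, ?_⟩
      have hg : nw[k] = x := by
        rw [PySem.List.pyGet?_natCast] at hget
        simpa [List.getElem?_eq_getElem hklt] using hget
      rw [List.take_add_one, List.getElem?_eq_getElem hklt]
      exact pv_suffix_concat.mpr (Or.inr ⟨nw.take k, by simp [hg], hs⟩)
    · exact ⟨0, rfl, Nat.zero_le _, List.nil_suffix⟩
  · rintro ⟨k, rfl, hk, hs⟩
    rcases pv_suffix_concat.mp hs with hnil | ⟨l', heq, hsp⟩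
    · right
      have hk0 : k = 0 := by
        rcases List.take_eq_nil_iff.mp hnil with h0 | h0
        · exact h0
        · simp [h0] at hk; omega
      simp [hk0]
    · left
      cases k with
      | zero => simp at heq
      | succ m =>
        have hm : m < nw.length := by omega
        rw [List.take_add_one, List.getElem?_eq_getElem hm] at heq
        simp only [Option.toList_some] at heq
        obtain ⟨h1, h2⟩ := List.append_inj' heq rfl
        obtain rfl : nw[m] = x := by simpa using h2
        refine ⟨(m : Int), ⟨(h (m : Int)).mpr ⟨m, rfl, by omega, h1 ▸ hsp⟩,
          by exact_mod_cast hm, ?_⟩, by push_cast; ring⟩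
        rw [PySem.List.pyGet?_natCast, List.getElem?_eq_getElem hm]

lemma pvInv_foldl (nw : List Int) :
    ∀ (l p : List Int) (S : List Int), pvInv p nw S →
      pvInv (p ++ l) nw (l.foldl (pvStepB nw) S) := by
  intro l
  induction l with
  | nil => intro p S h; simpa using h
  | cons x t ih =>
      intro p S h
      have := ih (p ++ [x]) (pvStepB nw S x) (pvInv_step p nw S x h)
      simpa [List.foldl] using this

lemma pv_endswith_iff (e nw : List Int) (k : Nat) (hpos : 0 < k) (hk : k ≤ nw.length) (he : k ≤ e.length) :
    (list_endswith e (PySem.List.slice nw none (some (k : Int))) = true) ↔ nw.take k <:+ e := by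
  rw [PySem.List.slice_to_natCast]
  unfold list_endswith
  have hlen : (nw.take k).length = k := by simp [Nat.min_eq_left hk]
  have hcond : ((nw.take k).length : Int) ≤ (e.length : Int) := by rw [hlen]; exact_mod_cast he
  rw [if_pos hcond, hlen, PySem.List.slice_some_none]
  have hclamp : PySem.List.clampIdx e.length (-(k : Int)) = e.length - k :=
    PySem.List.clampIdx_neg_natCast _ _ hpos
  rw [hclamp, beq_iff_eq, List.suffix_iff_eq_drop, hlen]
  exact eq_comm

-- A's loop returns the greatest valid overlap length ≤ m
lemma pvLoopA_spec (e nw : List Int) :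
    ∀ m : Nat, m ≤ e.length → m ≤ nw.length →
      ∃ rn : Nat, pvLoopA e nw (PySem.List.pyRange (m : Int) 0 (-1)) = (rn : Int) ∧
        rn ≤ m ∧ pvOk e nw rn ∧ ∀ k : Nat, k ≤ m → pvOk e nw k → k ≤ rn := by
  intro m
  induction m with
  | zero =>
      intro _ _
      rw [PySem.List.pyRange_neg_one_eq_nil (by norm_num)]
      exact ⟨0, rfl, le_refl 0, ⟨Nat.zero_le _, List.nil_suffix⟩, fun k hk _ => hk⟩
  | succ m ih =>
      intro he hn
      rw [PySem.List.pyRange_neg_one_cons (by exact_mod_cast Nat.succ_pos m)]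
      simp only [pvLoopA]
      by_cases hb : list_endswith e (PySem.List.slice nw none (some ((m + 1 : Nat) : Int))) = true
      · rw [if_pos hb]
        exact ⟨m + 1, rfl, le_refl _, ⟨hn, (pv_endswith_iff e nw (m + 1) (Nat.succ_pos m) hn he).mp hb⟩,
          fun k hk _ => hk⟩
      · rw [if_neg hb]
        obtain ⟨rn, hr, hrm, hok, hmax⟩ := ih (by omega) (by omega)
        have hcast : ((m + 1 : Nat) : Int) - 1 = ((m : Nat) : Int) := by push_cast; ring
        refine ⟨rn, by rw [hcast]; exact hr, by omega, hok, ?_⟩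
        intro k hk hokk
        rcases Nat.lt_or_ge k (m + 1) with hlt | hge
        · exact hmax k (by omega) hokk
        · exfalso
          have hkeq : k = m + 1 := by omega
          exact hb ((pv_endswith_iff e nw (m + 1) (Nat.succ_pos m) hn he).mpr (hkeq ▸ hokk.2))

-- ===== VERDICT (by name: the statement is the Claim_ definition above) =====
theorem trim_overlap_tokens_spec : Claim_equal_trim_overlap_tokens := by
  intro e nw _
  unfold Spec_trim_overlap_tokens trim_overlap_tokens trim_overlap_tokens_alt
  have hmin : min ((e.length : Int)) ((nw.length : Int)) = ((min e.length nw.length : Nat) : Int) := by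
    push_cast; rfl
  obtain ⟨rn, hr, hrm, hok, hmax⟩ :=
    pvLoopA_spec e nw (min e.length nw.length) (Nat.min_le_left _ _) (Nat.min_le_right _ _)
  have hinv : pvInv e nw (e.foldl (pvStepB nw) (PySem.Set.ofList [(0 : Int)])) := by
    have h := pvInv_foldl nw e [] (PySem.Set.ofList [(0 : Int)])
      (by simpa [PySem.Set.ofList, PySem.Set.add, PySem.Set.empty] using pvInv_nil nw)
    simpa using h
  cases hmb : PySem.List.max? (e.foldl (pvStepB nw) (PySem.Set.ofList [(0 : Int)])) (fun y => y) with
  | none =>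
      have h0mem : (0 : Int) ∈ e.foldl (pvStepB nw) (PySem.Set.ofList [(0 : Int)]) :=
        (hinv 0).mpr ⟨0, rfl, Nat.zero_le _, List.nil_suffix⟩
      rw [PySem.List.max?_eq_none_iff] at hmb
      rw [hmb] at h0mem
      exact absurd h0mem (List.not_mem_nil)
  | some mb =>
      have hmem := PySem.List.max?_mem hmb
      have hismax := PySem.List.max?_isMax hmb
      obtain ⟨kb, rfl, hkb, hsb⟩ := (hinv mb).mp hmem
      have hkbe : kb ≤ e.length := by
        have hl := hsb.length_le
        simpa [List.length_take, Nat.min_eq_left hkb] using hl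
      have h1 : kb ≤ rn := hmax kb (by omega) ⟨hkb, hsb⟩
      have h2 : ((rn : Nat) : Int) ≤ ((kb : Nat) : Int) :=
        hismax _ ((hinv (rn : Int)).mpr ⟨rn, rfl, hok⟩)
      have heq : rn = kb := by omega
      simp only [hmin, hr, hmb, heq, Option.getD_some]
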